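-- pv_equiv track=rewrite | github.com/kyle1304/home-pasoconn | 6주차/과제1.py | max_rainfall_event
-- ===== SOURCE A (Python) =====
-- def max_rainfall_event(rainfalls):
--     max_rainfall = 0
--     current_rainfall = 0
--     for rainfall in rainfalls:
--         if rainfall > 0:
--             current_rainfall += rainfall
--             if current_rainfall > max_rainfall:
--                 max_rainfall = current_rainfall
--         else:
--             current_rainfall = 0
--     return max_rainfall
-- ===== SOURCE B (Python) =====
-- def max_rainfall_event(rainfalls):
--     # Group-then-reduce: walk the list splitting it into maximal runs of
--     # positive values, sum each run, and take the max of run sums (0 default).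
--     best = 0
--     i = 0
--     n = len(rainfalls)
--     while i < n:
--         if rainfalls[i] > 0:
--             s = 0
--             while i < n and rainfalls[i] > 0:
--                 s += rainfalls[i]
--                 i += 1
--             if s > best:
--                 best = s
--         else:
--             i += 1
--     return best
-- ===== Notes on version B (the rewrite author's own statement) =====
-- stated objective: alternative
-- what changed: Replaces A's fused accumulate-and-track-max single loop over one (max,current) state with a group-then-reduce pass: split the list into maximal positive runs, sum each run, and take the maximum of run sums.
import Mathlib
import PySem

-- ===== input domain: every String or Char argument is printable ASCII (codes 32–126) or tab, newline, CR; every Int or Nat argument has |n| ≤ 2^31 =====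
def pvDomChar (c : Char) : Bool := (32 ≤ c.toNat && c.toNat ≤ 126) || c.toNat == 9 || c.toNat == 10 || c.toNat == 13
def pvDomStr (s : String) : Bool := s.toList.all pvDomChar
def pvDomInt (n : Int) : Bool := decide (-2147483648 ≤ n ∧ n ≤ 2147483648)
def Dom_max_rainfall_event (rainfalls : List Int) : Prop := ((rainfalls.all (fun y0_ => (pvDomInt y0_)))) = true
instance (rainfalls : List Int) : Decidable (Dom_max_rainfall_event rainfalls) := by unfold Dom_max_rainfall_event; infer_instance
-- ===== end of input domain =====

-- B changes the decomposition (A's fused max/current single loop becomes split-into-positive-runs then max of run sums); equal results, same cost.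

-- ===== PORT A =====
-- A: one fold carrying (max_rainfall, current_rainfall)
def max_rainfall_event (rainfalls : List Int) : Int :=
  (rainfalls.foldl
    (fun (st : Int × Int) rainfall =>
      if rainfall > 0 then
        let cur := st.2 + rainfall
        (if cur > st.1 then cur else st.1, cur)
      else (st.1, 0))
    (0, 0)).1

-- ===== PORT B =====
-- B's inner while loop: consume the leading positive run, returning (s + its sum, rest)
def pvTakeRun (s : Int) (xs : List Int) : Int × List Int :=
  match xs with
  | [] => (s, [])
  | x :: rest => if x > 0 then pvTakeRun (s + x) rest else (s, x :: rest)

theorem pvTakeRun_len (s : Int) (xs : List Int) : (pvTakeRun s xs).2.length ≤ xs.length := by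
  induction xs generalizing s with
  | nil => simp [pvTakeRun]
  | cons x rest ih =>
    simp only [pvTakeRun]
    split
    · exact le_trans (ih _) (Nat.le_succ _)
    · simp

-- B's outer loop: at each positive element sum the maximal run and fold the max
def max_rainfall_event_alt (rainfalls : List Int) : Int :=
  match rainfalls with
  | [] => 0
  | x :: rest =>
    if x > 0 then
      let p := pvTakeRun x rest
      max p.1 (max_rainfall_event_alt p.2)
    else max_rainfall_event_alt rest
termination_by rainfalls.length
decreasing_by
  · exact Nat.lt_succ_of_le (pvTakeRun_len x rest)
  · simp

-- ===== PRECONDITION & SPEC =====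
def Spec_max_rainfall_event (rainfalls : List Int) (out : Int) : Prop := out = max_rainfall_event_alt rainfalls
instance (rainfalls : List Int) (out : Int) : Decidable (Spec_max_rainfall_event rainfalls out) := by unfold Spec_max_rainfall_event; infer_instance

-- ===== CLAIM (what is proved, stated in full; the proofs are below) =====
def Claim_equal_max_rainfall_event : Prop := ∀ (rainfalls : List Int), Dom_max_rainfall_event rainfalls → Spec_max_rainfall_event rainfalls (max_rainfall_event rainfalls)

-- ===== LEMMAS AND PROOFS =====

-- proof-side characterisation of the best positive run sum reachable with current sum c
def pvG (c : Int) (xs : List Int) : Int :=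
  match xs with
  | [] => 0
  | x :: rest => if x > 0 then max (c + x) (pvG (c + x) rest) else pvG 0 rest

theorem pvG_nonneg (c : Int) (xs : List Int) : 0 ≤ pvG c xs := by
  induction xs generalizing c with
  | nil => simp [pvG]
  | cons x rest ih =>
    simp only [pvG]
    split
    · exact le_trans (ih _) (le_max_right _ _)
    · exact ih 0

-- A's fold from state (m, c) yields max m (pvG c xs), provided 0 ≤ m
theorem foldA_eq (xs : List Int) (m c : Int) (hm : 0 ≤ m) :
    (xs.foldl
      (fun (st : Int × Int) rainfall =>
        if rainfall > 0 then
          let cur := st.2 + rainfall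
          (if cur > st.1 then cur else st.1, cur)
        else (st.1, 0))
      (m, c)).1 = max m (pvG c xs) := by
  induction xs generalizing m c with
  | nil => simp [pvG]; omega
  | cons x rest ih =>
    simp only [List.foldl, pvG]
    by_cases hx : x > 0
    · simp only [if_pos hx]
      have h1 : (if c + x > m then c + x else m) = max m (c + x) := by omega
      rw [h1, ih _ _ (le_trans hm (le_max_left _ _)), max_assoc]
    · simp only [if_neg hx]
      exact ih _ _ hm

-- pvG with a pending run sum c equals: finish the run via pvTakeRun, then continue
theorem pvG_takeRun (xs : List Int) (c : Int) :
    max c (pvG c xs) = max (pvTakeRun c xs).1 (pvG 0 (pvTakeRun c xs).2) := by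
  induction xs generalizing c with
  | nil => simp [pvG, pvTakeRun]
  | cons x rest ih =>
    simp only [pvG, pvTakeRun]
    by_cases hx : x > 0
    · simp only [if_pos hx]
      rw [← ih (c + x)]
      exact max_eq_right (le_trans (by omega : c ≤ c + x) (le_max_left _ _))
    · simp only [if_neg hx, pvG]

-- B computes pvG 0
theorem alt_eq_pvG (n : ℕ) (xs : List Int) (hn : xs.length ≤ n) :
    max_rainfall_event_alt xs = pvG 0 xs := by
  induction n generalizing xs with
  | zero =>
    have : xs = [] := List.eq_nil_of_length_eq_zero (Nat.le_zero.mp hn)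
    subst this; simp [max_rainfall_event_alt, pvG]
  | succ n ih =>
    match xs with
    | [] => simp [max_rainfall_event_alt, pvG]
    | x :: rest =>
      simp only [max_rainfall_event_alt, pvG]
      by_cases hx : x > 0
      · simp only [if_pos hx]
        have hlen : (pvTakeRun x rest).2.length ≤ n :=
          le_trans (pvTakeRun_len x rest) (Nat.le_of_succ_le_succ hn)
        rw [ih _ hlen]
        simp only [zero_add]
        exact (pvG_takeRun rest x).symm
      · simp only [if_neg hx]
        exact ih rest (Nat.le_of_succ_le_succ hn)

-- ===== VERDICT (by name: the statement is the Claim_ definition above) =====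
theorem max_rainfall_event_spec : Claim_equal_max_rainfall_event := by
  intro xs _
  show max_rainfall_event xs = max_rainfall_event_alt xs
  rw [max_rainfall_event, foldA_eq xs 0 0 le_rfl, alt_eq_pvG xs.length xs le_rfl]
  have := pvG_nonneg 0 xs
  omega
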